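-- pv_equiv track=rewrite | github.com/DeepSoftwareAnalytics/RLCoder | utils/eval_codereval.py | count_indent
-- ===== SOURCE A (Python) =====
-- def count_indent(line):
--     count = 0
--     for char in line:
--         if char == ' ':
--             count += 1
--         elif char == '\t':
--             count += 4
--         else:
--             break
--     return count
-- ===== SOURCE B (Python) =====
-- def count_indent(line):
--     prefix = line[:len(line) - len(line.lstrip(' \t'))]
--     return prefix.count(' ') + 4 * prefix.count('\t')
-- ===== Notes on version B (the rewrite author's own statement) =====
-- stated objective: simpler
-- what changed: Replaces the accumulating early-break loop by slicing off the leading space/tab prefix (length arithmetic with lstrip restricted to space and tab) and tallying it with two str.count passes.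
import Mathlib
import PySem

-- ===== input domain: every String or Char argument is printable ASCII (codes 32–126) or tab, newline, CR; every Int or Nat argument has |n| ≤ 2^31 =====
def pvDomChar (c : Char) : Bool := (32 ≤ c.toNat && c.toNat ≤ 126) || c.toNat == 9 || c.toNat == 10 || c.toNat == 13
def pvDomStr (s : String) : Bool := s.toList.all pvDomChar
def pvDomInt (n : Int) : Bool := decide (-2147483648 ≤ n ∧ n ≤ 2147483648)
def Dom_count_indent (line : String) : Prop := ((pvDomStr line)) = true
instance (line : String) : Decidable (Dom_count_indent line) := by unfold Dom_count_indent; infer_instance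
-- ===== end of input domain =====

-- B builds the leading space/tab prefix once and tallies it with two count passes,
-- instead of A's single accumulating loop with an early break. Same O(n) cost.

-- ===== PORT A =====
-- the for-loop with break, over the characters, carrying `count`
def countIndentLoopA (cs : List Char) (count : Int) : Int :=
  match cs with
  | [] => count
  | c :: rest =>
    if c = ' ' then countIndentLoopA rest (count + 1)
    else if c = '\t' then countIndentLoopA rest (count + 4)
    else count

def count_indent (line : String) : Int :=
  countIndentLoopA line.toList 0

-- ===== PORT B =====
def count_indent_alt (line : String) : Int :=
  -- line.lstrip(' \t') hand-ported: drop leading chars that are ' ' or '\t' (exact for these chars)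
  let cs := line.toList
  let stripped := cs.dropWhile (fun c => c = ' ' ∨ c = '\t')
  let pre := cs.take (cs.length - stripped.length)   -- line[:len(line)-len(stripped)]
  -- str.count of a single character = List.count on the code points
  (pre.count ' ' : Int) + 4 * (pre.count '\t' : Int)

-- ===== PRECONDITION & SPEC =====
def Spec_count_indent (line : String) (out : Int) : Prop := out = count_indent_alt line
instance (line : String) (out : Int) : Decidable (Spec_count_indent line out) := by unfold Spec_count_indent; infer_instance

-- ===== CLAIM (what is proved, stated in full; the proofs are below) =====
def Claim_equal_count_indent : Prop := ∀ (line : String), Dom_count_indent line → Spec_count_indent line (count_indent line)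

-- ===== LEMMAS AND PROOFS =====

theorem take_sub_dropWhile (p : Char → Prop) [DecidablePred p] (cs : List Char) :
    cs.take (cs.length - (cs.dropWhile (fun c => decide (p c))).length)
      = cs.takeWhile (fun c => decide (p c)) := by
  have h := List.takeWhile_append_dropWhile (p := fun c => decide (p c)) (l := cs)
  have hlen : (cs.takeWhile (fun c => decide (p c))).length
      + (cs.dropWhile (fun c => decide (p c))).length = cs.length := by
    rw [← List.length_append, h]
  have hk : cs.length - (cs.dropWhile (fun c => decide (p c))).length
      = (cs.takeWhile (fun c => decide (p c))).length := by omega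
  rw [hk]
  exact (List.prefix_iff_eq_take.mp (List.takeWhile_prefix _)).symm

theorem loopA_eq (cs : List Char) (a : Int) :
    countIndentLoopA cs a =
      a + ((cs.takeWhile (fun c => decide (c = ' ' ∨ c = '\t'))).count ' ' : Int)
        + 4 * ((cs.takeWhile (fun c => decide (c = ' ' ∨ c = '\t'))).count '\t' : Int) := by
  induction cs generalizing a with
  | nil => simp [countIndentLoopA]
  | cons c rest ih =>
    by_cases hs : c = ' '
    · subst hs
      have hstep : countIndentLoopA (' ' :: rest) a = countIndentLoopA rest (a + 1) := rfl
      have htw : (' ' :: rest).takeWhile (fun c => decide (c = ' ' ∨ c = '\t'))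
          = ' ' :: rest.takeWhile (fun c => decide (c = ' ' ∨ c = '\t')) := by
        simp
      rw [hstep, ih, htw]
      simp
      ring
    · by_cases ht : c = '\t'
      · subst ht
        have hstep : countIndentLoopA ('\t' :: rest) a = countIndentLoopA rest (a + 4) := rfl
        have htw : ('\t' :: rest).takeWhile (fun c => decide (c = ' ' ∨ c = '\t'))
            = '\t' :: rest.takeWhile (fun c => decide (c = ' ' ∨ c = '\t')) := by
          simp
        rw [hstep, ih, htw]
        simp
        ring
      · have hnot : ¬ (c = ' ' ∨ c = '\t') := by tauto
        simp only [countIndentLoopA, if_neg hs, if_neg ht, List.takeWhile_cons]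
        simp [hnot]

-- ===== VERDICT (by name: the statement is the Claim_ definition above) =====
theorem alt_unfold (line : String) :
    count_indent_alt line =
      ((line.toList.take (line.toList.length
          - (line.toList.dropWhile (fun c => decide (c = ' ' ∨ c = '\t'))).length)).count ' ' : Int)
        + 4 * ((line.toList.take (line.toList.length
          - (line.toList.dropWhile (fun c => decide (c = ' ' ∨ c = '\t'))).length)).count '\t' : Int) := rfl

theorem count_indent_spec : Claim_equal_count_indent := by
  intro line _
  unfold Spec_count_indent count_indent
  rw [alt_unfold, take_sub_dropWhile (fun c => c = ' ' ∨ c = '\t') line.toList, loopA_eq]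
  ring
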